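-- pv_equiv track=rewrite | github.com/JoelDankert/Memorizer | main.py | first_letters
-- ===== SOURCE A (Python) =====
-- def first_letters(line,empty=0):
--     if empty == 3:
--         return " "*len(line)
--     newline = ""
--     excluded_chars = " -,.!?–\"\'&@…_()<>[]{}0123456789"
--     for i,ch in enumerate(line):
--         if ch == " ":
--             newline += ch
--
--         elif empty == 2: # empty 1
--             newline += "■"
--
--         elif ch in excluded_chars:
--             newline += ch
--
--         elif empty == 1: # empty 2
--             newline += "■"
--
--         elif i == 0:
--             newline += ch
--
--         elif line[i-1] in excluded_chars:
--             newline += ch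
--
--         else: # rest
--             newline += "■"
--
--
--     return newline
-- ===== SOURCE B (Python) =====
-- EXCLUDED = set(" -,.!?\u2013\"'&@\u2026_()<>[]{}0123456789")
--
-- def first_letters(line, empty=0):
--     if empty == 3:
--         return " " * len(line)
--     if empty == 2:
--         return "".join(c if c == " " else "\u25a0" for c in line)
--     if empty == 1:
--         return "".join(c if c == " " or c in EXCLUDED else "\u25a0" for c in line)
--     # default mode: process maximal runs of letters / non-letters
--     out = []
--     i, n = 0, len(line)
--     while i < n:
--         j = i
--         if line[i] in EXCLUDED:
--             while j < n and line[j] in EXCLUDED: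
--                 j += 1
--             out.append(line[i:j])
--         else:
--             while j < n and line[j] not in EXCLUDED:
--                 j += 1
--             out.append(line[i] + "\u25a0" * (j - i - 1))
--         i = j
--     return "".join(out)
-- ===== Notes on version B (the rewrite author's own statement) =====
-- stated objective: faster
-- what changed: Replaced the single per-character loop with previous-character checks by early returns per mode plus, for the default mode, a run-based scan that emits maximal excluded/letter runs via slicing (first char kept, rest blocked).
import Mathlib
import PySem

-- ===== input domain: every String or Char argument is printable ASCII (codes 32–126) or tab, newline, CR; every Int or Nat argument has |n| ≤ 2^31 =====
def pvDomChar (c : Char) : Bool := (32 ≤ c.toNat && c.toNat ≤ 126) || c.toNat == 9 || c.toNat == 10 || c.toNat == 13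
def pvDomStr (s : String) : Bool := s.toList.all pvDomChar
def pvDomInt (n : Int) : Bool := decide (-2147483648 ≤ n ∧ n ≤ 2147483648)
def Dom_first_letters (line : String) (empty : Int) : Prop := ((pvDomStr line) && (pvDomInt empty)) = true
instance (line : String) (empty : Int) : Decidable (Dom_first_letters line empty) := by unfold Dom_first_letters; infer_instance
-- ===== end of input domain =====

-- B replaces A's per-character loop (with previous-character checks) by per-mode early
-- returns and, in the default mode, a scan over maximal runs; same O(n) cost.

-- ===== PORT A =====
-- excluded_chars = " -,.!?–\"\'&@…_()<>[]{}0123456789"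
def exCharsA : List Char := " -,.!?–\"'&@…_()<>[]{}0123456789".toList

-- "for i,ch in enumerate(line)" ported as an index-carrying recursion over the rest of
-- the string; "line[i-1]" is ported with getD (exact: that branch only runs with 1 ≤ i < len).
def flLoopA (empty : Int) (cs : List Char) : Nat → List Char → List Char → List Char
  | _, [], newline => newline
  | i, ch :: rest, newline =>
    let out :=
      if ch == ' ' then newline ++ [ch]
      else if empty == 2 then newline ++ ['■']
      else if exCharsA.contains ch then newline ++ [ch]
      else if empty == 1 then newline ++ ['■']
      else if i == 0 then newline ++ [ch]
      else if exCharsA.contains (cs.getD (i - 1) ' ') then newline ++ [ch]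
      else newline ++ ['■']
    flLoopA empty cs (i + 1) rest out

def first_letters (line : String) (empty : Int) : String :=
  if empty == 3 then String.ofList (List.replicate line.toList.length ' ')
  else String.ofList (flLoopA empty line.toList 0 line.toList [])

-- ===== PORT B =====
def exCharsB : List Char := " -,.!?–\"'&@…_()<>[]{}0123456789".toList

-- default mode: emit maximal runs — an excluded run unchanged, a letter run as its
-- first char followed by '■'s.
def flRunsB : List Char → List Char
  | [] => []
  | c :: rest =>
    if exCharsB.contains c then
      (c :: rest.takeWhile (fun x => exCharsB.contains x))
        ++ flRunsB (rest.dropWhile (fun x => exCharsB.contains x))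
    else
      (c :: (rest.takeWhile (fun x => !exCharsB.contains x)).map (fun _ => '■'))
        ++ flRunsB (rest.dropWhile (fun x => !exCharsB.contains x))
termination_by cs => cs.length
decreasing_by
  · exact Nat.lt_succ_of_le (List.length_dropWhile_le _ _)
  · exact Nat.lt_succ_of_le (List.length_dropWhile_le _ _)

def first_letters_alt (line : String) (empty : Int) : String :=
  if empty == 3 then String.ofList (line.toList.map (fun _ => ' '))
  else if empty == 2 then
    String.ofList (line.toList.map (fun c => if c == ' ' then c else '■'))
  else if empty == 1 then
    String.ofList (line.toList.map (fun c => if c == ' ' || exCharsB.contains c then c else '■'))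
  else String.ofList (flRunsB line.toList)

-- ===== PRECONDITION & SPEC =====
def Spec_first_letters (line : String) (empty : Int) (out : String) : Prop := out = first_letters_alt line empty
instance (line : String) (empty : Int) (out : String) : Decidable (Spec_first_letters line empty out) := by unfold Spec_first_letters; infer_instance

-- ===== CLAIM (what is proved, stated in full; the proofs are below) =====
def Claim_equal_first_letters : Prop := ∀ (line : String) (empty : Int), Dom_first_letters line empty → Spec_first_letters line empty (first_letters line empty)

-- ===== LEMMAS AND PROOFS =====
-- the character A emits at a position whose previous character is p (none at i = 0)
def emitA (empty : Int) (p : Option Char) (ch : Char) : Char :=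
  if ch == ' ' then ch
  else if empty == 2 then '■'
  else if exCharsA.contains ch then ch
  else if empty == 1 then '■'
  else match p with
    | none => ch
    | some q => if exCharsA.contains q then ch else '■'

-- A's output as a map carrying the previous character
def outA (empty : Int) : Option Char → List Char → List Char
  | _, [] => []
  | p, c :: rest => emitA empty p c :: outA empty (some c) rest

theorem exB_eq_exA : exCharsB = exCharsA := rfl

theorem emitA_ex (empty : Int) (h2 : empty ≠ 2) (p : Option Char) (ch : Char)
    (hch : exCharsA.contains ch = true) : emitA empty p ch = ch := by
  unfold emitA
  have hm : ch ∈ exCharsA := by simpa using hch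
  by_cases hs : ch = ' '
  · simp [hs]
  · simp [hs, hm, show (empty == 2) = false by simpa using h2]

theorem space_mem_exA : exCharsA.contains ' ' = true := by decide

theorem emitA_letter (empty : Int) (h1 : empty ≠ 1) (h2 : empty ≠ 2)
    (p : Option Char) (ch : Char) (hch : exCharsA.contains ch = false) :
    emitA empty p ch
      = (match p with
         | none => ch
         | some q => if exCharsA.contains q then ch else '■') := by
  have hs : ch ≠ ' ' := by
    intro h; rw [h] at hch; rw [space_mem_exA] at hch; cases hch
  have hm : ch ∉ exCharsA := by simpa using hch
  unfold emitA
  simp [hs, hm, show (empty == 2) = false by simpa using h2,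
        show (empty == 1) = false by simpa using h1]

theorem flRunsB_peel (cs : List Char) :
    flRunsB cs
      = cs.takeWhile (fun x => exCharsB.contains x)
          ++ flRunsB (cs.dropWhile (fun x => exCharsB.contains x)) := by
  cases cs with
  | nil => simp
  | cons c rest =>
    by_cases hc : c ∈ exCharsB
    · rw [flRunsB]
      simp [hc, List.takeWhile_cons, List.dropWhile_cons]
    · simp [hc, List.takeWhile_cons, List.dropWhile_cons]

theorem outA_runs (empty : Int) (h1 : empty ≠ 1) (h2 : empty ≠ 2) :
    ∀ (n : Nat) (cs : List Char), cs.length ≤ n →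
      ((∀ p, (p = none ∨ ∃ q, p = some q ∧ exCharsA.contains q = true) →
          outA empty p cs = flRunsB cs) ∧
       (∀ q, exCharsA.contains q = false →
          outA empty (some q) cs
            = (cs.takeWhile (fun x => !exCharsB.contains x)).map (fun _ => '■')
                ++ flRunsB (cs.dropWhile (fun x => !exCharsB.contains x)))) := by
  intro n
  induction n with
  | zero =>
    intro cs hcs
    have : cs = [] := List.eq_nil_of_length_eq_zero (Nat.le_zero.mp hcs)
    subst this
    constructor
    · intro p _; simp [outA, flRunsB]
    · intro q _; simp [outA, flRunsB]
  | succ m ih =>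
    intro cs hcs
    cases cs with
    | nil =>
      constructor
      · intro p _; simp [outA, flRunsB]
      · intro q _; simp [outA, flRunsB]
    | cons c rest =>
      have hrest : rest.length ≤ m := by
        simpa using Nat.lt_succ_iff.mp (Nat.lt_of_lt_of_le (by simp) hcs)
      have ihrest := ih rest hrest
      have hout : ∀ p, outA empty p (c :: rest) = emitA empty p c :: outA empty (some c) rest :=
        fun p => rfl
      by_cases hc : c ∈ exCharsA
      · -- excluded head: emitted unchanged, and it extends (or starts) an excluded run
        have hcc : exCharsA.contains c = true := by simpa using hc
        have hrun : flRunsB (c :: rest) = c :: flRunsB rest := by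
          rw [flRunsB, if_pos (show exCharsB.contains c = true from hcc),
              flRunsB_peel rest]
          simp
        constructor
        · intro p hp
          rw [hout, emitA_ex empty h2 p c hcc, hrun,
              ihrest.1 (some c) (Or.inr ⟨c, rfl, hcc⟩)]
        · intro q hq
          have ht : (c :: rest).takeWhile (fun x => !exCharsB.contains x) = [] := by
            simp [List.takeWhile_cons, exB_eq_exA, hc]
          have hd : (c :: rest).dropWhile (fun x => !exCharsB.contains x) = c :: rest := by
            simp [List.dropWhile_cons, exB_eq_exA, hc]
          rw [hout, emitA_ex empty h2 _ c hcc, ht, hd, hrun,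
              ihrest.1 (some c) (Or.inr ⟨c, rfl, hcc⟩)]
          simp
      · -- letter head
        have hcc : exCharsA.contains c = false := by simpa using hc
        have hrun : flRunsB (c :: rest)
            = c :: ((rest.takeWhile (fun x => !exCharsB.contains x)).map (fun _ => '■')
                ++ flRunsB (rest.dropWhile (fun x => !exCharsB.contains x))) := by
          rw [flRunsB, if_neg (by simpa [exB_eq_exA] using hc)]
          simp
        constructor
        · intro p hp
          rw [hout, emitA_letter empty h1 h2 p c hcc, hrun, ihrest.2 c hcc]
          rcases hp with h | ⟨q, hq, hqex⟩
          · subst h; rfl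
          · subst hq; simp [show q ∈ exCharsA by simpa using hqex]
        · intro q hq
          rw [hout, emitA_letter empty h1 h2 _ c hcc, ihrest.2 c hcc]
          simp [show q ∉ exCharsA by simpa using hq, List.takeWhile_cons, List.dropWhile_cons, exB_eq_exA, hc]

theorem outA_mode2 (cs : List Char) : ∀ (p : Option Char),
      outA 2 p cs = cs.map (fun c => if c == ' ' then c else '■') := by
  induction cs with
  | nil => intro p; rfl
  | cons c rest ih =>
    intro p
    show emitA 2 p c :: outA 2 (some c) rest = _
    rw [ih]
    unfold emitA
    by_cases hs : c = ' ' <;> simp [hs]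

theorem outA_mode1 (cs : List Char) : ∀ (p : Option Char),
      outA 1 p cs = cs.map (fun c => if c == ' ' || exCharsB.contains c then c else '■') := by
  induction cs with
  | nil => intro p; rfl
  | cons c rest ih =>
    intro p
    show emitA 1 p c :: outA 1 (some c) rest = _
    rw [ih]
    unfold emitA
    by_cases hs : c = ' '
    · simp [hs]
    · by_cases hc : exCharsA.contains c = true
      · simp [hs, hc, exB_eq_exA]
      · simp [hs, exB_eq_exA, show exCharsA.contains c = false by simpa using hc]

theorem flLoopA_eq_outA (empty : Int) (full : List Char) :
    ∀ (rem : List Char) (k : Nat) (acc : List Char), rem = full.drop k →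
      flLoopA empty full k rem acc
        = acc ++ outA empty (if k = 0 then none else some (full.getD (k - 1) ' ')) rem := by
  intro rem
  induction rem with
  | nil => intro k acc h; simp [flLoopA, outA]
  | cons ch rest ih =>
    intro k acc h
    have hdrop1 : full.drop (k + 1) = rest := by
      have : full.drop (k + 1) = (full.drop k).drop 1 := by
        rw [List.drop_drop]
      rw [this, ← h]
      rfl
    have hgetk : full.getD k ' ' = ch := by
      have h00 : (full.drop k)[0]? = some ch := by rw [← h]; rfl
      have h0 : full[k]? = some ch := by simpa using h00
      simp [List.getD_eq_getElem?_getD, h0]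
    have hk1 : (if k + 1 = 0 then (none : Option Char) else some (full.getD (k + 1 - 1) ' '))
        = some ch := by
      rw [if_neg (Nat.succ_ne_zero k)]
      simpa using congrArg some hgetk
    rw [flLoopA, ih (k + 1) _ hdrop1.symm, hk1]
    simp only [outA]
    unfold emitA
    by_cases hk : k = 0
    · subst hk
      split_ifs <;> simp_all
    · rw [if_neg hk]
      have hk' : (k == 0) = false := by simpa using hk
      simp only [hk']
      split_ifs <;> simp_all

-- ===== VERDICT (by name: the statement is the Claim_ definition above) =====
theorem first_letters_spec : Claim_equal_first_letters := by
  unfold Claim_equal_first_letters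
  intro line empty _
  unfold Spec_first_letters first_letters first_letters_alt
  by_cases h3 : empty = 3
  · simp [h3, List.map_const']
  · by_cases h2 : empty = 2
    · subst h2
      simp [flLoopA_eq_outA 2 line.toList line.toList 0 [] rfl, outA_mode2]
    · by_cases h1 : empty = 1
      · subst h1
        simp [flLoopA_eq_outA 1 line.toList line.toList 0 [] rfl, outA_mode1]
      · have hr := (outA_runs empty h1 h2 line.toList.length line.toList le_rfl).1
          none (Or.inl rfl)
        simp [flLoopA_eq_outA empty line.toList line.toList 0 [] rfl, h3, h2, h1, hr]
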